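-- pv_equiv track=rewrite | github.com/AbhishekKolakkal/sdeInterviewThings | advancedProblems2.py | checkMaximumWithSlidingWindow
-- ===== SOURCE A (Python) =====
-- def checkMaximumWithSlidingWindow(A, middle, target):
--     i = 0
--     j = middle - 1
--     ans = 0
--     while (j < len(A)):
--         sum = 0
--
--         for k in range(i, (j + 1)):
--             sum = sum + A[k]
--
--         ans = max(ans, sum)
--
--         i += 1
--         j += 1
--
--     if ans <= target:
--         return True
--     else:
--         return False
-- ===== SOURCE B (Python) =====
-- def checkMaximumWithSlidingWindow(A, middle, target):
--     ans = 0
--     if 1 <= middle <= len(A):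
--         s = sum(A[:middle])
--         ans = max(ans, s)
--         for k in range(middle, len(A)):
--             s += A[k] - A[k - middle]
--             ans = max(ans, s)
--     return ans <= target
-- ===== Notes on version B (the rewrite author's own statement) =====
-- stated objective: faster
-- what changed: Replaces the per-window inner summation loop with a single-pass sliding running sum updated incrementally (add entering element, subtract leaving one).
import Mathlib
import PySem

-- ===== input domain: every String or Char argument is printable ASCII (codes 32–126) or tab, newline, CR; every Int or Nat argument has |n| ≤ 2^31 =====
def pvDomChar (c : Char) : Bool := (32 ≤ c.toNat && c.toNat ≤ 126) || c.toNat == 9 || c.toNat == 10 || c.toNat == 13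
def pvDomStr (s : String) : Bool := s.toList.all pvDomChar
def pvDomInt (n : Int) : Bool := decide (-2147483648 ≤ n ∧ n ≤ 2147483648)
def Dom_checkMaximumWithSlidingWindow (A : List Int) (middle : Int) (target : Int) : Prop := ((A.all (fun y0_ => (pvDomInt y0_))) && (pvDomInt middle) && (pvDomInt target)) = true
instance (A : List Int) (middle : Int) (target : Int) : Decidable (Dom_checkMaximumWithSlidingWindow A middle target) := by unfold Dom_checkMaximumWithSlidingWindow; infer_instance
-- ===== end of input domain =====

-- B replaces A's per-window re-summation by a single-pass incremental sliding sum (objective: faster, O(n) vs O(n*middle)).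

-- ===== PORT A =====
-- the while-loop of A: state (i, j, ans); each round re-sums A[i..j] from scratch
def pvLoopA (A : List Int) (i j ans : Int) : Int :=
  if h : j < (A.length : Int) then
    let sum := (PySem.List.pyRange i (j + 1) 1).foldl
      (fun s k => s + PySem.List.pyGetD A k 0) 0
    pvLoopA A (i + 1) (j + 1) (max ans sum)
  else ans
termination_by ((A.length : Int) - j).toNat
decreasing_by omega

def checkMaximumWithSlidingWindow (A : List Int) (middle : Int) (target : Int) : Bool :=
  if pvLoopA A 0 (middle - 1) 0 ≤ target then true else false

-- ===== PORT B =====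
def checkMaximumWithSlidingWindow_alt (A : List Int) (middle : Int) (target : Int) : Bool :=
  let ans : Int :=
    if 1 ≤ middle ∧ middle ≤ (A.length : Int) then
      let s := (PySem.List.slice A none (some middle)).sum
      ((PySem.List.pyRange middle (A.length : Int) 1).foldl
        (fun (p : Int × Int) k =>
          let s' := p.1 + PySem.List.pyGetD A k 0 - PySem.List.pyGetD A (k - middle) 0
          (s', max p.2 s'))
        (s, max 0 s)).2
    else 0
  decide (ans ≤ target)

-- ===== PRECONDITION & SPEC =====
def Spec_checkMaximumWithSlidingWindow (A : List Int) (middle : Int) (target : Int) (out : Bool) : Prop := out = checkMaximumWithSlidingWindow_alt A middle target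
instance (A : List Int) (middle : Int) (target : Int) (out : Bool) : Decidable (Spec_checkMaximumWithSlidingWindow A middle target out) := by unfold Spec_checkMaximumWithSlidingWindow; infer_instance

-- ===== CLAIM (what is proved, stated in full; the proofs are below) =====
def Claim_equal_checkMaximumWithSlidingWindow : Prop := ∀ (A : List Int) (middle : Int) (target : Int), Dom_checkMaximumWithSlidingWindow A middle target → Spec_checkMaximumWithSlidingWindow A middle target (checkMaximumWithSlidingWindow A middle target)

-- ===== LEMMAS AND PROOFS =====

-- sum of the window of length m starting at index i
def pvWin (A : List Int) (m i : Nat) : Int := ((A.drop i).take m).sum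

-- A's inner for-loop computes the window sum
lemma winSum_eq (A : List Int) (i : Nat) :
    ∀ (m : Nat), i + m ≤ A.length →
    (PySem.List.pyRange (i : Int) ((i : Int) + (m : Int)) 1).foldl
      (fun s k => s + PySem.List.pyGetD A k 0) 0 = pvWin A m i := by
  intro m
  induction m with
  | zero =>
      intro _
      rw [show ((i : Int) + ((0 : Nat) : Int)) = (i : Int) by push_cast; ring]
      rw [PySem.List.pyRange_one_eq_nil (le_refl _)]
      simp [pvWin]
  | succ m ih =>
      intro h
      rw [show ((i : Int) + ((m + 1 : Nat) : Int)) = ((i : Int) + (m : Int)) + 1 by push_cast; ring]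
      rw [PySem.List.pyRange_one_succ_right (by omega)]
      rw [List.foldl_append, ih (by omega)]
      simp only [List.foldl_cons, List.foldl_nil]
      rw [show ((i : Int) + (m : Int)) = (((i + m : Nat)) : Int) by push_cast; ring]
      rw [PySem.List.pyGetD_natCast]
      rw [List.getD_eq_getElem _ _ (by omega)]
      unfold pvWin
      rw [List.sum_take_succ _ m (by simp; omega)]
      congr 1
      exact (List.getElem_drop ..).symm

-- sliding update: window at k-m plus A[k] minus A[k-m] is the window at k-m+1
lemma pvWin_slide (A : List Int) (m k : Nat) (_hm : 1 ≤ m) (hmk : m ≤ k) (h : k < A.length) :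
    pvWin A m (k - m) + A.getD k 0 - A.getD (k - m) 0 = pvWin A m (k - m + 1) := by
  unfold pvWin
  obtain ⟨m', rfl⟩ : ∃ m', m = m' + 1 := ⟨m - 1, by omega⟩
  rw [List.drop_eq_getElem_cons (show k - (m' + 1) < A.length by omega)]
  rw [List.take_succ_cons, List.sum_cons]
  rw [List.sum_take_succ _ m' (by simp; omega)]
  rw [List.getElem_drop]
  rw [List.getD_eq_getElem _ _ (by omega), List.getD_eq_getElem _ _ (by omega)]
  have e : k - (m' + 1) + 1 + m' = k := by omega
  simp only [e]
  ring

lemma pvLoopA_small (A : List Int) :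
    ∀ (c : Nat) (i j : Int), j < i → (((A.length : Int)) - j).toNat = c → pvLoopA A i j 0 = 0 := by
  intro c
  induction c with
  | zero =>
      intro i j hji hc
      rw [pvLoopA, dif_neg (by omega)]
  | succ c ih =>
      intro i j hji hc
      by_cases h : j < (A.length : Int)
      · rw [pvLoopA, dif_pos h]
        rw [PySem.List.pyRange_one_eq_nil (by omega)]
        simp only [List.foldl_nil]
        rw [show max (0 : Int) 0 = 0 by simp]
        exact ih (i + 1) (j + 1) (by omega) (by omega)
      · rw [pvLoopA, dif_neg h]

lemma pvLoopA_eq (A : List Int) (m : Nat) (_hm : 1 ≤ m) :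
    ∀ (c : Nat) (i : Nat) (ans : Int), A.length + 1 - (i + m) = c →
    pvLoopA A (i : Int) ((i : Int) + (m : Int) - 1) ans
      = (List.range' i c).foldl (fun a t => max a (pvWin A m t)) ans := by
  intro c
  induction c with
  | zero =>
      intro i ans hc
      rw [pvLoopA, dif_neg (by omega)]
      simp
  | succ c ih =>
      intro i ans hc
      rw [pvLoopA, dif_pos (by omega)]
      rw [show (i : Int) + (m : Int) - 1 + 1 = (i : Int) + (m : Int) by ring]
      rw [winSum_eq A i m (by omega)]
      rw [show (i : Int) + (m : Int) = ((i + 1 : Nat) : Int) + (m : Int) - 1 by push_cast; ring]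
      rw [show (i : Int) + 1 = ((i + 1 : Nat) : Int) by push_cast; ring]
      rw [ih (i + 1) (max ans (pvWin A m i)) (by omega)]
      rw [List.range'_succ]
      simp

lemma foldB_eq (A : List Int) (m : Nat) (hm : 1 ≤ m) :
    ∀ (c : Nat) (k : Nat) (ans : Int), m ≤ k → A.length - k = c →
    ((PySem.List.pyRange (k : Int) ((A.length : Int)) 1).foldl
      (fun (p : Int × Int) j =>
        let s' := p.1 + PySem.List.pyGetD A j 0 - PySem.List.pyGetD A (j - (m : Int)) 0
        (s', max p.2 s'))
      (pvWin A m (k - m), ans)).2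
      = (List.range' (k - m + 1) c).foldl (fun a t => max a (pvWin A m t)) ans := by
  intro c
  induction c with
  | zero =>
      intro k ans hmk hc
      rw [PySem.List.pyRange_one_eq_nil (by omega)]
      simp
  | succ c ih =>
      intro k ans hmk hc
      rw [PySem.List.pyRange_one_cons (by omega)]
      simp only [List.foldl_cons, PySem.List.pyGetD_natCast]
      rw [show (k : Int) - (m : Int) = ((k - m : Nat) : Int) by omega]
      simp only [PySem.List.pyGetD_natCast]
      rw [pvWin_slide A m k hm hmk (by omega)]
      rw [show (k : Int) + 1 = ((k + 1 : Nat) : Int) by push_cast; ring]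
      rw [show k - m + 1 = (k + 1) - m by omega]
      rw [ih (k + 1) (max ans (pvWin A m ((k + 1) - m))) (by omega) (by omega)]
      rw [List.range'_succ]
      simp

lemma main_eq (A : List Int) (middle target : Int) :
    checkMaximumWithSlidingWindow A middle target = checkMaximumWithSlidingWindow_alt A middle target := by
  unfold checkMaximumWithSlidingWindow checkMaximumWithSlidingWindow_alt
  by_cases h1 : 1 ≤ middle ∧ middle ≤ (A.length : Int)
  · obtain ⟨ha, hb⟩ := h1
    have hmid : middle = (middle.toNat : Int) := by omega
    rw [hmid]
    have hm1 : 1 ≤ middle.toNat := by omega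
    have hmlen : middle.toNat ≤ A.length := by omega
    rw [if_pos (show (1 : Int) ≤ (middle.toNat : Int) ∧ (middle.toNat : Int) ≤ (A.length : Int) by
      constructor <;> omega)]
    rw [PySem.List.slice_to_natCast]
    have hA : pvLoopA A 0 ((middle.toNat : Int) - 1) 0
        = (List.range' 0 (A.length + 1 - middle.toNat)).foldl
            (fun a t => max a (pvWin A middle.toNat t)) 0 := by
      have := pvLoopA_eq A middle.toNat hm1 (A.length + 1 - middle.toNat) 0 0 (by omega)
      simpa using this
    have hB := foldB_eq A middle.toNat hm1 (A.length - middle.toNat) middle.toNat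
      (max 0 ((A.take middle.toNat).sum)) (le_refl _) rfl
    simp only [Nat.sub_self] at hB
    rw [show pvWin A middle.toNat 0 = (A.take middle.toNat).sum by simp [pvWin]] at hB
    rw [hA, hB]
    rw [show A.length + 1 - middle.toNat = (A.length - middle.toNat) + 1 by omega,
        List.range'_succ]
    simp only [List.foldl_cons, Nat.zero_add]
    rw [show pvWin A middle.toNat 0 = (A.take middle.toNat).sum by simp [pvWin]]
    split_ifs with h <;> simp [h]
  · rw [if_neg h1]
    have h0 : pvLoopA A 0 (middle - 1) 0 = 0 := by
      rcases not_and_or.mp h1 with h | h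
      · exact pvLoopA_small A (((A.length : Int)) - (middle - 1)).toNat 0 (middle - 1)
          (by omega) rfl
      · rw [pvLoopA, dif_neg (by omega)]
    rw [h0]
    split_ifs with h <;> simp [h]


-- ===== VERDICT (by name: the statement is the Claim_ definition above) =====
theorem checkMaximumWithSlidingWindow_spec : Claim_equal_checkMaximumWithSlidingWindow := by
  intro A middle target _
  unfold Spec_checkMaximumWithSlidingWindow
  exact main_eq A middle target
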